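-- pv_equiv track=rewrite | github.com/kimkihyun1/TIL | CodingTest/2405/240513.py | solution
-- ===== SOURCE A (Python) =====
-- import heapq
--
-- def solution(jobs):
--     answer = 0
--     tasks = sorted([(job[1], job[0]) for job in jobs], key=lambda x: (x[1], x[0]), reverse=True) # 오름차순
--     heap = []
--     heapq.heappush(heap, tasks.pop())
--     current_time = 0
--
--     while len(heap) > 0:
--         during_time, ask_time = heapq.heappop(heap)
--         current_time = max(current_time+during_time, ask_time+during_time)
--         answer += current_time - ask_time
--
--         while len(tasks) > 0 and tasks[-1][1] <= current_time:
--             heapq.heappush(heap, tasks.pop())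
--         if len(tasks) > 0 and len(heap) == 0:
--             heapq.heappush(heap, tasks.pop())
--
--     return answer // len(jobs)
-- ===== SOURCE B (Python) =====
-- def solution(jobs):
--     # SJF simulation without heapq: a plain 'ready' list scanned with an explicit
--     # min-search, and the sorted job list consumed from the front.
--     rest = sorted((job[0], job[1]) for job in jobs)   # (request, duration), earliest first
--     ready = [rest[0]]
--     rest = rest[1:]
--     time = 0
--     total = 0
--     while ready:
--         best = ready[0]
--         for p in ready[1:]:
--             if (p[1], p[0]) < (best[1], best[0]):
--                 best = p
--         ready.remove(best)
--         time = max(time, best[0]) + best[1]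
--         total += time - best[0]
--         while rest and rest[0][0] <= time:
--             ready.append(rest[0])
--             rest = rest[1:]
--         if not ready and rest:
--             ready.append(rest[0])
--             rest = rest[1:]
--     return total // len(jobs)
-- ===== Notes on version B (the rewrite author's own statement) =====
-- stated objective: simpler
-- what changed: Replaces the heapq min-heap with a plain ready list scanned by an explicit (duration, request) min-search, and the reverse-sorted stack popped from the end with the ascending-sorted job list consumed from the front.
import Mathlib
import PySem

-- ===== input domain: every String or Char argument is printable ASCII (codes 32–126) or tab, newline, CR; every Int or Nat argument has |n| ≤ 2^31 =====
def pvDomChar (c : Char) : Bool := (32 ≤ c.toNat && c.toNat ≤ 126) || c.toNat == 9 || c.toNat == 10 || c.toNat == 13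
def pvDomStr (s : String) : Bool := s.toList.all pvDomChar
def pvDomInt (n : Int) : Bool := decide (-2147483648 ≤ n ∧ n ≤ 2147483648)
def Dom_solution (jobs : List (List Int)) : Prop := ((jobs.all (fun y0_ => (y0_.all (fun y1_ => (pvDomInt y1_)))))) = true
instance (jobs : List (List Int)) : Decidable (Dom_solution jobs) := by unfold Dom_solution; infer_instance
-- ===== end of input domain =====

-- B replaces A's heapq min-heap by a plain ready list scanned with an explicit min-search and
-- consumes the ascending-sorted job list from the front (A pops a reverse-sorted stack from the end);
-- same return value, no speed claim. A mutates no argument.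

-- ===== PORT A =====
-- (duration, request) pair built from a job, as A's comprehension does; job[1]/job[0]
-- raise IndexError for short jobs — excluded by Pre_solution, `.getD 0` is never reached there.
def jobPairA (job : List Int) : Int × Int :=
  ((PySem.List.pyGet? job 1).getD 0, (PySem.List.pyGet? job 0).getD 0)

-- heapq.heappop on the heap's contents: removes the lexicographically least (duration, request)
-- tuple (first occurrence); heappush is modelled as appending to the list of contents.
def heapPopA (heap : List (Int × Int)) : Option ((Int × Int) × List (Int × Int)) :=
  match heap with
  | [] => none
  | p :: t =>
    match heapPopA t with
    | none => some (p, [])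
    | some (q, t') =>
      if p.1 < q.1 ∨ (p.1 = q.1 ∧ p.2 ≤ q.2) then some (p, t) else some (q, p :: t')

-- A's inner while: `while len(tasks) > 0 and tasks[-1][1] <= current_time: heappush(heap, tasks.pop())`
def refillA (heap tasks : List (Int × Int)) (t : Int) : List (Int × Int) × List (Int × Int) :=
  match h : tasks.getLast? with
  | none => (heap, tasks)
  | some p =>
    if p.2 ≤ t then refillA (heap ++ [p]) tasks.dropLast t else (heap, tasks)
termination_by tasks.length
decreasing_by
  cases tasks with
  | nil => simp at h
  | cons a l => simp [List.length_dropLast]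

-- A's outer while loop; fuel = number of jobs (the loop pops exactly one job per iteration).
def loopA : Nat → Int → Int → List (Int × Int) → List (Int × Int) → Int
  | 0, answer, _, _, _ => answer
  | fuel + 1, answer, current_time, heap, tasks =>
    match heapPopA heap with
    | none => answer
    | some ((during_time, ask_time), heap') =>
      let current_time' := max (current_time + during_time) (ask_time + during_time)
      let answer' := answer + (current_time' - ask_time)
      let ht := refillA heap' tasks current_time'
      match ht.1, ht.2.getLast? with
      | [], some p => loopA fuel answer' current_time' [p] ht.2.dropLast
      | _, _ => loopA fuel answer' current_time' ht.1 ht.2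

def solution (jobs : List (List Int)) : Int :=
  let tasks := PySem.List.sorted2 (jobs.map jobPairA) (fun x => x.2) (fun x => x.1) true
  match tasks.getLast? with
  | none => 0  -- Python raises IndexError on `tasks.pop()` (empty jobs); excluded by Pre_solution
  | some p =>
    PySem.Int.floordiv (loopA jobs.length 0 0 [p] tasks.dropLast) (jobs.length : Int)

-- ===== PORT B =====
-- (request, duration) pair built from a job, as B's generator does.
def jobPairB (job : List Int) : Int × Int :=
  ((PySem.List.pyGet? job 0).getD 0, (PySem.List.pyGet? job 1).getD 0)

-- B's explicit min-search over ready[1:], starting from best = ready[0].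
def bestOf (b : Int × Int) (l : List (Int × Int)) : Int × Int :=
  l.foldl (fun b p => if p.2 < b.2 ∨ (p.2 = b.2 ∧ p.1 < b.1) then p else b) b

-- B's inner while: `while rest and rest[0][0] <= time: ready.append(rest[0]); rest = rest[1:]`
def refillB (ready rest : List (Int × Int)) (t : Int) : List (Int × Int) × List (Int × Int) :=
  match rest with
  | [] => (ready, rest)
  | p :: tl => if p.1 ≤ t then refillB (ready ++ [p]) tl t else (ready, rest)

-- B's while loop; fuel = number of jobs.
def loopB : Nat → Int → Int → List (Int × Int) → List (Int × Int) → Int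
  | 0, total, _, _, _ => total
  | fuel + 1, total, time, ready, rest =>
    match ready with
    | [] => total
    | r0 :: rs =>
      let best := bestOf r0 rs
      let ready' := (PySem.List.remove? ready best).getD []
      let time' := max time best.1 + best.2
      let total' := total + (time' - best.1)
      let rr := refillB ready' rest time'
      match rr.1, rr.2 with
      | [], p :: tl => loopB fuel total' time' [p] tl
      | _, _ => loopB fuel total' time' rr.1 rr.2

def solution_alt (jobs : List (List Int)) : Int :=
  match PySem.List.sorted2 (jobs.map jobPairB) (fun x => x.1) (fun x => x.2) false with
  | [] => 0  -- Python raises IndexError on `rest[0]` (empty jobs); excluded by Pre_solution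
  | p :: tl =>
    PySem.Int.floordiv (loopB jobs.length 0 0 [p] tl) (jobs.length : Int)

-- ===== PRECONDITION & SPEC =====
-- Pre_ excludes exactly the inputs where Python A raises IndexError: an empty job list
-- (tasks.pop() from the empty list) and any job with fewer than two entries (job[1]).
def Pre_solution (jobs : List (List Int)) : Prop :=
  jobs ≠ [] ∧ ∀ job ∈ jobs, 2 ≤ job.length
instance (jobs : List (List Int)) : Decidable (Pre_solution jobs) := by
  unfold Pre_solution; infer_instance

def pvWitness_solution : List (List Int) := [[0, 3], [1, 9], [2, 6]]

def Spec_solution (jobs : List (List Int)) (out : Int) : Prop := out = solution_alt jobs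
instance (jobs : List (List Int)) (out : Int) : Decidable (Spec_solution jobs out) := by
  unfold Spec_solution; infer_instance

-- ===== CLAIM (what is proved, stated in full; the proofs are below) =====
def Claim_equal_solution : Prop :=
  ∀ (jobs : List (List Int)), Dom_solution jobs → Pre_solution jobs → Spec_solution jobs (solution jobs)

-- ===== LEMMAS AND PROOFS =====

-- lexicographic order on Int pairs (Python tuple comparison)
def lexLt (a b : Int × Int) : Prop := a.1 < b.1 ∨ (a.1 = b.1 ∧ a.2 < b.2)
def lexLe (a b : Int × Int) : Prop := a.1 < b.1 ∨ (a.1 = b.1 ∧ a.2 ≤ b.2)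

theorem lexLe_refl (a : Int × Int) : lexLe a a := by
  obtain ⟨a1, a2⟩ := a; simp [lexLe]

theorem lexLe_trans {a b c : Int × Int} (h1 : lexLe a b) (h2 : lexLe b c) : lexLe a c := by
  obtain ⟨a1, a2⟩ := a; obtain ⟨b1, b2⟩ := b; obtain ⟨c1, c2⟩ := c
  simp only [lexLe] at *; omega

theorem lexLe_antisymm {a b : Int × Int} (h1 : lexLe a b) (h2 : lexLe b a) : a = b := by
  obtain ⟨a1, a2⟩ := a; obtain ⟨b1, b2⟩ := b
  simp only [lexLe] at *; simp only [Prod.mk.injEq]; omega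

theorem lexLe_neg {a b : Int × Int} (h : ¬ lexLe a b) : lexLe b a := by
  obtain ⟨a1, a2⟩ := a; obtain ⟨b1, b2⟩ := b
  simp only [lexLe] at *; omega

theorem lexLt_le {a b : Int × Int} (h : lexLt a b) : lexLe a b := by
  obtain ⟨a1, a2⟩ := a; obtain ⟨b1, b2⟩ := b
  simp only [lexLe, lexLt] at *; omega

theorem lexLt_neg {a b : Int × Int} (h : ¬ lexLt a b) : lexLe b a := by
  obtain ⟨a1, a2⟩ := a; obtain ⟨b1, b2⟩ := b
  simp only [lexLe, lexLt] at *; omega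

theorem heapPopA_cons (p : Int × Int) (t : List (Int × Int)) :
    heapPopA (p :: t) = match heapPopA t with
      | none => some (p, [])
      | some (q, t') =>
        if p.1 < q.1 ∨ (p.1 = q.1 ∧ p.2 ≤ q.2) then some (p, t) else some (q, p :: t') := rfl

theorem heapPopA_spec (t : List (Int × Int)) :
    ∀ p : Int × Int, ∃ m, heapPopA (p :: t) = some (m, (p :: t).erase m) ∧ m ∈ p :: t ∧
      ∀ x ∈ p :: t, lexLe m x := by
  induction t with
  | nil =>
    intro p
    refine ⟨p, by simp [heapPopA], by simp, ?_⟩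
    intro x hx; simp at hx; rw [hx]; exact lexLe_refl p
  | cons q0 ts ih =>
    intro p
    obtain ⟨m, hpop, hmem, hmin⟩ := ih q0
    by_cases hle : p.1 < m.1 ∨ (p.1 = m.1 ∧ p.2 ≤ m.2)
    · have hle' : lexLe p m := hle
      refine ⟨p, ?_, by simp, ?_⟩
      · rw [heapPopA_cons, hpop]
        simp only [hle, if_true, List.erase_cons_head]
      · intro x hx
        rcases List.mem_cons.mp hx with h | h
        · rw [h]; exact lexLe_refl p
        · exact lexLe_trans hle' (hmin x h)
    · have hle' : ¬ lexLe p m := hle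
      have hne : p ≠ m := fun h => hle' (h ▸ lexLe_refl p)
      refine ⟨m, ?_, List.mem_cons_of_mem _ hmem, ?_⟩
      · rw [heapPopA_cons, hpop]
        simp only [hle, if_false, List.erase_cons, beq_iff_eq, hne, if_false]
      · intro x hx
        rcases List.mem_cons.mp hx with h | h
        · rw [h]; exact lexLe_neg hle'
        · exact hmin x h

theorem bestOf_spec (l : List (Int × Int)) :
    ∀ b : Int × Int, bestOf b l ∈ b :: l ∧
      ∀ x ∈ b :: l, lexLe (Prod.swap (bestOf b l)) (Prod.swap x) := by
  induction l with
  | nil =>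
    intro b
    refine ⟨by simp [bestOf], ?_⟩
    intro x hx; simp [bestOf] at hx ⊢; rw [hx]; exact lexLe_refl _
  | cons p ps ih =>
    intro b
    have hstep : bestOf b (p :: ps) =
        bestOf (if p.2 < b.2 ∨ (p.2 = b.2 ∧ p.1 < b.1) then p else b) ps := rfl
    by_cases hc : lexLt (Prod.swap p) (Prod.swap b)
    · have hc' : p.2 < b.2 ∨ (p.2 = b.2 ∧ p.1 < b.1) := hc
      rw [hstep, if_pos hc']
      obtain ⟨hm, hmin⟩ := ih p
      refine ⟨?_, ?_⟩
      · rcases List.mem_cons.mp hm with h | h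
        · rw [h]; simp
        · simp [h]
      · intro x hx
        rcases List.mem_cons.mp hx with h | h
        · rw [h]
          exact lexLe_trans (hmin p (List.mem_cons_self)) (lexLt_le hc)
        · exact hmin x h
    · have hc' : ¬ (p.2 < b.2 ∨ (p.2 = b.2 ∧ p.1 < b.1)) := hc
      rw [hstep, if_neg hc']
      obtain ⟨hm, hmin⟩ := ih b
      refine ⟨?_, ?_⟩
      · rcases List.mem_cons.mp hm with h | h
        · rw [h]; simp
        · simp [h]
      · intro x hx
        rcases List.mem_cons.mp hx with h | h
        · exact h ▸ hmin b (List.mem_cons_self)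
        · rcases List.mem_cons.mp h with h2 | h2
          · rw [h2]
            exact lexLe_trans (hmin b (List.mem_cons_self)) (lexLt_neg hc)
          · exact hmin x (List.mem_cons_of_mem _ h2)

theorem pop_rel (r0 : Int × Int) (rs : List (Int × Int)) :
    heapPopA ((r0 :: rs).map Prod.swap) =
      some (Prod.swap (bestOf r0 rs), ((r0 :: rs).erase (bestOf r0 rs)).map Prod.swap) := by
  obtain ⟨m, hpop, hmem, hmin⟩ := heapPopA_spec (rs.map Prod.swap) (Prod.swap r0)
  obtain ⟨hbm, hbmin⟩ := bestOf_spec rs r0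
  have hswap : Prod.swap r0 :: rs.map Prod.swap = (r0 :: rs).map Prod.swap := by simp
  rw [hswap] at hpop hmem hmin
  obtain ⟨b0, hb0mem, hb0⟩ := List.mem_map.mp hmem
  have heq : b0 = bestOf r0 rs := by
    have h1 : lexLe m (Prod.swap (bestOf r0 rs)) :=
      hmin _ (List.mem_map_of_mem hbm)
    have h2 : lexLe (Prod.swap (bestOf r0 rs)) m := by
      rw [← hb0]; exact hbmin b0 hb0mem
    rw [← hb0] at h1 h2
    exact Prod.swap_injective (lexLe_antisymm h1 h2)
  subst heq
  rw [hpop, ← hb0, List.map_erase Prod.swap_injective]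

theorem refill_rel (rest : List (Int × Int)) :
    ∀ (ready : List (Int × Int)) (t : Int),
      refillA (ready.map Prod.swap) ((rest.map Prod.swap).reverse) t =
        ((refillB ready rest t).1.map Prod.swap, ((refillB ready rest t).2.map Prod.swap).reverse) := by
  induction rest with
  | nil =>
    intro ready t
    rw [refillA, refillB]
    simp
  | cons p tl ih =>
    intro ready t
    have hlist : ((p :: tl).map Prod.swap).reverse =
        (tl.map Prod.swap).reverse ++ [Prod.swap p] := by simp
    rw [hlist, refillA, refillB]
    split
    · next h => simp at h
    · next p1 h =>
      rw [List.getLast?_concat] at h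
      injection h with h; subst h
      simp only [List.dropLast_concat, Prod.snd_swap]
      by_cases hpt : p.1 ≤ t
      · simp only [hpt, if_true]
        rw [show List.map Prod.swap ready ++ [p.swap] = (ready ++ [p]).map Prod.swap by simp]
        exact ih (ready ++ [p]) t
      · simp only [hpt, if_false]
        simp
theorem loop_rel (fuel : Nat) :
    ∀ (total time : Int) (ready rest : List (Int × Int)),
      loopA fuel total time (ready.map Prod.swap) ((rest.map Prod.swap).reverse) =
        loopB fuel total time ready rest := by
  induction fuel with
  | zero => intro _ _ _ _; rfl
  | succ fuel ih =>
    intro total time ready rest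
    cases ready with
    | nil => rfl
    | cons r0 rs =>
      obtain ⟨b1, b2, hb⟩ : ∃ x y, bestOf r0 rs = (x, y) := ⟨_, _, rfl⟩
      have hpop := pop_rel r0 rs
      rw [hb] at hpop
      have hmem : (b1, b2) ∈ r0 :: rs := hb ▸ (bestOf_spec rs r0).1
      have hrem : (PySem.List.remove? (r0 :: rs) (b1, b2)).getD [] =
          (r0 :: rs).erase (b1, b2) := by
        rw [PySem.List.remove?_eq_some_erase _ _ hmem]; rfl
      simp only [loopA, loopB, hpop, hb, hrem]
      simp only [Prod.swap_prod_mk]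
      have ht : max (time + b2) (b1 + b2) = max time b1 + b2 := by omega
      rw [ht, refill_rel]
      rcases hr : refillB ((r0 :: rs).erase (b1, b2)) rest (max time b1 + b2) with ⟨u, v⟩
      cases u with
      | cons u0 us => exact ih _ _ (u0 :: us) v
      | nil =>
        cases v with
        | nil => exact ih _ _ [] []
        | cons p tl =>
          have h2 : ((List.map Prod.swap (([] : List (Int × Int)), p :: tl).2).reverse) =
              (tl.map Prod.swap).reverse ++ [p.swap] := by simp
          simp only [h2, List.getLast?_concat, List.dropLast_concat]
          exact ih _ _ [p] tl
def bB (a b : Int × Int) : Bool :=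
  decide (a.1 < b.1) || (!decide (b.1 < a.1) && decide (a.2 < b.2))

def bA (a b : Int × Int) : Bool :=
  decide (b.2 < a.2) || (!decide (a.2 < b.2) && decide (b.1 < a.1))

theorem bA_swap (x z : Int × Int) : bA (Prod.swap x) (Prod.swap z) = bB z x := rfl

theorem bB_iff {x y : Int × Int} : bB x y = true ↔ lexLt x y := by
  obtain ⟨x1, x2⟩ := x; obtain ⟨y1, y2⟩ := y
  simp [bB, lexLt]; omega

theorem not_lt_of_le_of_lt {y z x : Int × Int} (h1 : lexLe y z) (h2 : lexLt z x) :
    ¬ lexLt x y := by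
  obtain ⟨x1, x2⟩ := x; obtain ⟨y1, y2⟩ := y; obtain ⟨z1, z2⟩ := z
  simp only [lexLe, lexLt] at *; omega

theorem lexLe_not_lt_eq {x z : Int × Int} (h1 : lexLe x z) (h2 : ¬ lexLt x z) : x = z := by
  obtain ⟨x1, x2⟩ := x; obtain ⟨z1, z2⟩ := z
  simp only [lexLe, lexLt, Prod.mk.injEq] at *; omega

theorem insertBy_nil {α : Type} (before : α → α → Bool) (x : α) :
    PySem.List.insertBy before x [] = [x] := rfl

theorem insertBy_cons {α : Type} (before : α → α → Bool) (x y : α) (ys : List α) :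
    PySem.List.insertBy before x (y :: ys) =
      if before x y then x :: y :: ys else y :: PySem.List.insertBy before x ys := rfl

theorem insertBy_pairwise (x : Int × Int) :
    ∀ l : List (Int × Int), l.Pairwise lexLe → (PySem.List.insertBy bB x l).Pairwise lexLe := by
  intro l
  induction l with
  | nil => intro _; simp [insertBy_nil]
  | cons y ys ih =>
    intro hpw
    rw [List.pairwise_cons] at hpw
    obtain ⟨hy, hys⟩ := hpw
    rw [insertBy_cons]
    by_cases hc : bB x y = true
    · rw [if_pos hc]
      have hxy : lexLe x y := lexLt_le (bB_iff.mp hc)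
      refine List.Pairwise.cons ?_ (List.Pairwise.cons hy hys)
      intro z hz
      rcases List.mem_cons.mp hz with h | h
      · rw [h]; exact hxy
      · exact lexLe_trans hxy (hy z h)
    · rw [if_neg hc]
      have hyx : lexLe y x := lexLt_neg (fun h => hc (bB_iff.mpr h))
      refine List.Pairwise.cons ?_ (ih hys)
      intro z hz
      rcases (PySem.List.mem_insertBy bB x z ys).mp hz with h | h
      · rw [h]; exact hyx
      · exact hy z h

theorem insertBy_append_last (x z : Int × Int) (hxz : lexLe x z) :
    ∀ init : List (Int × Int),
      PySem.List.insertBy bB x (init ++ [z]) = PySem.List.insertBy bB x init ++ [z] := by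
  intro init
  induction init with
  | nil =>
    simp only [List.nil_append, insertBy_nil, insertBy_cons]
    by_cases hbz : bB x z = true
    · rw [if_pos hbz]; rfl
    · rw [if_neg hbz]
      have : x = z := lexLe_not_lt_eq hxz (fun h => hbz (bB_iff.mpr h))
      rw [this]; rfl
  | cons i0 irest ih =>
    rw [List.cons_append, insertBy_cons, insertBy_cons]
    by_cases hc : bB x i0 = true
    · rw [if_pos hc, if_pos hc]; rfl
    · rw [if_neg hc, if_neg hc, ih]; rfl

theorem insert_rev (x : Int × Int) :
    ∀ acc : List (Int × Int), acc.Pairwise lexLe →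
      PySem.List.insertBy bA (Prod.swap x) ((acc.map Prod.swap).reverse) =
        ((PySem.List.insertBy bB x acc).map Prod.swap).reverse := by
  intro acc
  induction acc using List.reverseRecOn with
  | nil => intro _; rfl
  | append_singleton init z ih =>
    intro hpw
    rw [List.pairwise_append] at hpw
    obtain ⟨hinit, _, hmax⟩ := hpw
    have hmax' : ∀ y ∈ init, lexLe y z := fun y hy => hmax y hy z (by simp)
    have hlist : ((init ++ [z]).map Prod.swap).reverse =
        Prod.swap z :: (init.map Prod.swap).reverse := by simp
    rw [hlist, insertBy_cons, bA_swap]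
    by_cases hzx : bB z x = true
    · rw [if_pos hzx]
      have hnot : ∀ y ∈ init ++ [z], bB x y = false := by
        intro y hy
        have hyz : lexLe y z := by
          rcases List.mem_append.mp hy with h | h
          · exact hmax' y h
          · simp at h; rw [h]; exact lexLe_refl z
        rw [Bool.eq_false_iff]
        exact fun h => not_lt_of_le_of_lt hyz (bB_iff.mp hzx) (bB_iff.mp h)
      rw [PySem.List.insertBy_of_forall_not_before bB x (init ++ [z]) hnot]
      simp
    · rw [if_neg hzx]
      have hxz : lexLe x z := lexLt_neg (fun h => hzx (bB_iff.mpr h))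
      rw [ih hinit, insertBy_append_last x z hxz]
      simp

theorem fold_rel :
    ∀ (l acc : List (Int × Int)), acc.Pairwise lexLe →
      List.foldl (fun acc x => PySem.List.insertBy bA x acc)
          ((acc.map Prod.swap).reverse) (l.map Prod.swap) =
        ((List.foldl (fun acc x => PySem.List.insertBy bB x acc) acc l).map Prod.swap).reverse := by
  intro l
  induction l with
  | nil => intro _ _; rfl
  | cons x xs ih =>
    intro acc hpw
    rw [List.map_cons, List.foldl_cons, List.foldl_cons, insert_rev x acc hpw]
    exact ih _ (insertBy_pairwise x acc hpw)

theorem sort_rel (l : List (Int × Int)) :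
    PySem.List.sorted2 (l.map Prod.swap) (fun x => x.2) (fun x => x.1) true =
      ((PySem.List.sorted2 l (fun x => x.1) (fun x => x.2) false).map Prod.swap).reverse := by
  have h := fold_rel l [] List.Pairwise.nil
  exact h

-- ===== VERDICT (by name: the statement is the Claim_ definition above) =====
theorem solution_spec : Claim_equal_solution := by
  intro jobs _ _
  unfold Spec_solution solution solution_alt
  have hmap : jobs.map jobPairA = (jobs.map jobPairB).map Prod.swap := by
    simp only [List.map_map]
    exact List.map_congr_left (fun a _ => by simp [jobPairA, jobPairB])
  rw [hmap, sort_rel]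
  cases h : PySem.List.sorted2 (jobs.map jobPairB) (fun x => x.1) (fun x => x.2) false with
  | nil => simp
  | cons p tl =>
    simp only [List.map_cons, List.reverse_cons, List.getLast?_concat, List.dropLast_concat]
    have : [Prod.swap p] = [p].map Prod.swap := rfl
    rw [this, loop_rel]
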